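-- pv_equiv track=rewrite | github.com/ZygimantasB/etherscan_explorer | services/security_scanner.py | get_security_recommendations
-- ===== SOURCE A (Python) =====
-- def get_security_recommendations(findings):
--     """
--     Generate security recommendations based on findings.
--     """
--     recommendations = []
--
--     has_high_risk = any(f.get('risk') == 'high' for f in findings)
--     has_medium_risk = any(f.get('risk') == 'medium' for f in findings)
--
--     if has_high_risk:
--         recommendations.append({
--             'priority': 'critical',
--             'action': 'Exercise extreme caution',
--             'detail': 'High-risk patterns detected. Do not interact without thorough review.'
--         })
--
--     if has_medium_risk:
--         recommendations.append({
--             'priority': 'warning',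
--             'action': 'Review carefully',
--             'detail': 'Medium-risk patterns found. Verify contract behavior before interacting.'
--         })
--
--     # Check for unverified
--     unverified = any('not verified' in f.get('message', '').lower() for f in findings)
--     if unverified:
--         recommendations.append({
--             'priority': 'warning',
--             'action': 'Request verification',
--             'detail': 'Contract source code is not verified. Consider avoiding unverified contracts.'
--         })
--
--     if not recommendations:
--         recommendations.append({
--             'priority': 'info',
--             'action': 'Standard precautions',
--             'detail': 'No major issues detected, but always verify before large transactions.'
--         })
--
--     return recommendations
-- ===== SOURCE B (Python) =====
-- # Rule-table design: each finding is classified into a bitmask of triggered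
-- # rules; the masks are OR-reduced, and recommendations are emitted by
-- # filtering a static rule table against the combined mask.
--
-- _HIGH, _MEDIUM, _UNVERIFIED = 1, 2, 4
--
-- _RULES = [
--     (_HIGH, {
--         'priority': 'critical',
--         'action': 'Exercise extreme caution',
--         'detail': 'High-risk patterns detected. Do not interact without thorough review.'
--     }),
--     (_MEDIUM, {
--         'priority': 'warning',
--         'action': 'Review carefully',
--         'detail': 'Medium-risk patterns found. Verify contract behavior before interacting.'
--     }),
--     (_UNVERIFIED, {
--         'priority': 'warning',
--         'action': 'Request verification',
--         'detail': 'Contract source code is not verified. Consider avoiding unverified contracts.'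
--     }),
-- ]
--
-- _DEFAULT = {
--     'priority': 'info',
--     'action': 'Standard precautions',
--     'detail': 'No major issues detected, but always verify before large transactions.'
-- }
--
--
-- def _classify(f):
--     """Bitmask of the rules this single finding triggers."""
--     bits = 0
--     risk = f.get('risk')
--     if risk == 'high':
--         bits |= _HIGH
--     if risk == 'medium':
--         bits |= _MEDIUM
--     if 'not verified' in f.get('message', '').lower():
--         bits |= _UNVERIFIED
--     return bits
--
--
-- def get_security_recommendations(findings):
--     """
--     Generate security recommendations based on findings.
--     """
--     mask = 0
--     for f in findings:
--         mask |= _classify(f)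
--     return [dict(rec) for bit, rec in _RULES if mask & bit] or [dict(_DEFAULT)]
-- ===== Notes on version B (the rewrite author's own statement) =====
-- stated objective: alternative
-- what changed: B is table-driven: each finding is classified once into an int bitmask of triggered rules, the masks are OR-reduced over the list, and the output is produced by filtering a static rule table against the combined mask (with a default when no bit is set), replacing A's three any() scans and hand-written if-append blocks.
import Mathlib
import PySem

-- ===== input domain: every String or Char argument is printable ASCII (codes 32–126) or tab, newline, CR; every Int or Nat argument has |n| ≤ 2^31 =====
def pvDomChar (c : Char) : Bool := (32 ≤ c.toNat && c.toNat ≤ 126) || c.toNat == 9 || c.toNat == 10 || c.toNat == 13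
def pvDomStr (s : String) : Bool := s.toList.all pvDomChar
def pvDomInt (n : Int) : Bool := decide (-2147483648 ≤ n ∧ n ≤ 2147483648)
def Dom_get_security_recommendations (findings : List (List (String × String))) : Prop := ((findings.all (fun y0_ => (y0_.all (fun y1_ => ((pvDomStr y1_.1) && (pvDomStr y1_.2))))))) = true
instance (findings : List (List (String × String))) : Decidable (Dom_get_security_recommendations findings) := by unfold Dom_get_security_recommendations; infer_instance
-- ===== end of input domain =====

-- B is table-driven: findings are classified into bitmasks, OR-reduced, and a static
-- rule table is filtered against the combined mask; A does three any() scans with if-appends.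

-- f.get(k) on an association list: first match (both Pythons call dict.get)
def pvGet (f : List (String × String)) (k : String) : Option String :=
  match f with
  | [] => none
  | (a, b) :: t => if a == k then some b else pvGet t k

def pvRecHigh : List (String × String) :=
  [("priority", "critical"), ("action", "Exercise extreme caution"),
   ("detail", "High-risk patterns detected. Do not interact without thorough review.")]
def pvRecMed : List (String × String) :=
  [("priority", "warning"), ("action", "Review carefully"),
   ("detail", "Medium-risk patterns found. Verify contract behavior before interacting.")]
def pvRecUnv : List (String × String) :=
  [("priority", "warning"), ("action", "Request verification"),
   ("detail", "Contract source code is not verified. Consider avoiding unverified contracts.")]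
def pvRecInfo : List (String × String) :=
  [("priority", "info"), ("action", "Standard precautions"),
   ("detail", "No major issues detected, but always verify before large transactions.")]

def pvIsHigh (f : List (String × String)) : Bool := pvGet f "risk" == some "high"
def pvIsMed (f : List (String × String)) : Bool := pvGet f "risk" == some "medium"
def pvIsUnv (f : List (String × String)) : Bool :=
  PySem.Str.isIn "not verified" (PySem.Str.lower ((pvGet f "message").getD ""))

-- ===== PORT A =====
def get_security_recommendations (findings : List (List (String × String))) : List (List (String × String)) :=
  let recommendations : List (List (String × String)) := []
  let has_high_risk := findings.any pvIsHigh
  let has_medium_risk := findings.any pvIsMed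
  let recommendations := if has_high_risk then recommendations ++ [pvRecHigh] else recommendations
  let recommendations := if has_medium_risk then recommendations ++ [pvRecMed] else recommendations
  let unverified := findings.any pvIsUnv
  let recommendations := if unverified then recommendations ++ [pvRecUnv] else recommendations
  if recommendations.isEmpty then recommendations ++ [pvRecInfo] else recommendations

-- ===== PORT B =====
-- Source B's static rule table
def pvRules : List (Nat × List (String × String)) :=
  [(1, pvRecHigh), (2, pvRecMed), (4, pvRecUnv)]

-- Source B's _classify: bitmask of the rules one finding triggers
def pvClassify (f : List (String × String)) : Nat :=
  let bits : Nat := 0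
  let risk := pvGet f "risk"
  let bits := if risk == some "high" then bits ||| 1 else bits
  let bits := if risk == some "medium" then bits ||| 2 else bits
  let bits := if PySem.Str.isIn "not verified" (PySem.Str.lower ((pvGet f "message").getD "")) then bits ||| 4 else bits
  bits

def get_security_recommendations_alt (findings : List (List (String × String))) : List (List (String × String)) :=
  let mask := findings.foldl (fun m f => m ||| pvClassify f) 0
  -- 'mask & bit' truthiness in Python = the bitwise AND is nonzero
  let recs := (pvRules.filter (fun r => mask &&& r.1 != 0)).map Prod.snd
  if recs.isEmpty then [pvRecInfo] else recs

-- ===== PRECONDITION & SPEC =====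
def Spec_get_security_recommendations (findings : List (List (String × String))) (out : List (List (String × String))) : Prop := out = get_security_recommendations_alt findings
instance (findings : List (List (String × String))) (out : List (List (String × String))) : Decidable (Spec_get_security_recommendations findings out) := by unfold Spec_get_security_recommendations; infer_instance

-- ===== CLAIM (what is proved, stated in full; the proofs are below) =====
def Claim_equal_get_security_recommendations : Prop := ∀ (findings : List (List (String × String))), Dom_get_security_recommendations findings → Spec_get_security_recommendations findings (get_security_recommendations findings)

-- ===== LEMMAS AND PROOFS =====

-- mask built from three flag bits
def pvMk3 (a b c : Bool) : Nat :=
  (if a then 1 else 0) ||| (if b then 2 else 0) ||| (if c then 4 else 0)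

theorem pvClassify_eq (f : List (String × String)) :
    pvClassify f = pvMk3 (pvIsHigh f) (pvIsMed f) (pvIsUnv f) := by
  unfold pvClassify pvMk3 pvIsHigh pvIsMed pvIsUnv
  by_cases h1 : pvGet f "risk" == some "high" <;>
  by_cases h2 : pvGet f "risk" == some "medium" <;>
  by_cases h3 : PySem.Str.isIn "not verified" (PySem.Str.lower ((pvGet f "message").getD "")) <;>
    simp [PySem.Str.isIn, PySem.Str.lower] at h3 <;> simp [h1, h2, h3]

theorem pvMk3_or (a b c d e g : Bool) :
    pvMk3 a b c ||| pvMk3 d e g = pvMk3 (a || d) (b || e) (c || g) := by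
  cases a <;> cases b <;> cases c <;> cases d <;> cases e <;> cases g <;> decide

theorem pvFold_mask (l : List (List (String × String))) (a b c : Bool) :
    l.foldl (fun m f => m ||| pvClassify f) (pvMk3 a b c)
      = pvMk3 (a || l.any pvIsHigh) (b || l.any pvIsMed) (c || l.any pvIsUnv) := by
  induction l generalizing a b c with
  | nil => simp
  | cons h t ih =>
    rw [List.foldl_cons, pvClassify_eq, pvMk3_or, ih]
    simp [Bool.or_assoc]

-- ===== VERDICT (by name: the statement is the Claim_ definition above) =====
theorem get_security_recommendations_spec : Claim_equal_get_security_recommendations := by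
  intro findings _
  unfold Spec_get_security_recommendations get_security_recommendations get_security_recommendations_alt
  have h0 : (0 : Nat) = pvMk3 false false false := by decide
  rw [h0, pvFold_mask]
  cases hh : findings.any pvIsHigh <;> cases hm : findings.any pvIsMed <;>
    cases hu : findings.any pvIsUnv <;> simp [pvMk3, pvRules]
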